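-- pv_equiv track=rewrite | github.com/S-W-Leong/E-Com67 | lambda/chat/chat.py | generate_follow_up_suggestions
-- ===== SOURCE A (Python) =====
-- from typing import Dict, List, Any, Optional
--
-- def generate_follow_up_suggestions(tool_results: List[Dict[str, Any]], original_message: str) -> List[str]:
--     """
--     Generate follow-up suggestions based on tool results and user message.
--
--     Args:
--         tool_results: List of tool execution results
--         original_message: Original user message (for context)
--
--     Returns:
--         List of follow-up suggestions
--     """
--     suggestions = []
--
--     # Check what tools were used to generate contextual suggestions
--     tool_names = [result.get('tool_name', '') for result in tool_results]
--
--     if any('product_search' in name for name in tool_names):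
--         suggestions.extend([
--             "Would you like to see more details about any of these products?",
--             "Should I add any of these items to your cart?",
--             "Would you like to see similar products?"
--         ])
--     elif any('cart' in name for name in tool_names):
--         suggestions.extend([
--             "Ready to checkout?",
--             "Would you like to continue shopping?",
--             "Need help with shipping options?"
--         ])
--     elif any('order' in name for name in tool_names):
--         suggestions.extend([
--             "Would you like to track another order?",
--             "Need help with returns or exchanges?",
--             "Have questions about your order?"
--         ])
--     else:
--         # General suggestions
--         suggestions.extend([
--             "What else can I help you with?",
--             "Would you like to browse our products?",
--             "Need help with your account?"
--         ])
--
--     return suggestions[:3]  # Limit to 3 suggestions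
-- ===== SOURCE B (Python) =====
-- SUGGESTION_SETS = [
--     [  # 0: product_search
--         "Would you like to see more details about any of these products?",
--         "Should I add any of these items to your cart?",
--         "Would you like to see similar products?",
--     ],
--     [  # 1: cart
--         "Ready to checkout?",
--         "Would you like to continue shopping?",
--         "Need help with shipping options?",
--     ],
--     [  # 2: order
--         "Would you like to track another order?",
--         "Need help with returns or exchanges?",
--         "Have questions about your order?",
--     ],
--     [  # 3: general fallback
--         "What else can I help you with?",
--         "Would you like to browse our products?",
--         "Need help with your account?",
--     ],
-- ]
--
--
-- def _rank(name):
--     """Priority rank of a single tool name (0 = highest priority)."""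
--     if 'product_search' in name:
--         return 0
--     if 'cart' in name:
--         return 1
--     if 'order' in name:
--         return 2
--     return 3
--
--
-- def generate_follow_up_suggestions(tool_results, original_message):
--     # One pass: keep the best (lowest) priority rank seen so far, then
--     # index into the table of canned suggestion sets.
--     best = 3
--     for result in tool_results:
--         best = min(best, _rank(result.get('tool_name', '')))
--     return list(SUGGESTION_SETS[best])
-- ===== Notes on version B (the rewrite author's own statement) =====
-- stated objective: alternative
-- what changed: Replaces A's three staged any-substring scans over a prebuilt names list with a single pass over tool_results that folds a numeric priority rank (minimum of a per-tool classification) and indexes once into a table of suggestion sets.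
import Mathlib
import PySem

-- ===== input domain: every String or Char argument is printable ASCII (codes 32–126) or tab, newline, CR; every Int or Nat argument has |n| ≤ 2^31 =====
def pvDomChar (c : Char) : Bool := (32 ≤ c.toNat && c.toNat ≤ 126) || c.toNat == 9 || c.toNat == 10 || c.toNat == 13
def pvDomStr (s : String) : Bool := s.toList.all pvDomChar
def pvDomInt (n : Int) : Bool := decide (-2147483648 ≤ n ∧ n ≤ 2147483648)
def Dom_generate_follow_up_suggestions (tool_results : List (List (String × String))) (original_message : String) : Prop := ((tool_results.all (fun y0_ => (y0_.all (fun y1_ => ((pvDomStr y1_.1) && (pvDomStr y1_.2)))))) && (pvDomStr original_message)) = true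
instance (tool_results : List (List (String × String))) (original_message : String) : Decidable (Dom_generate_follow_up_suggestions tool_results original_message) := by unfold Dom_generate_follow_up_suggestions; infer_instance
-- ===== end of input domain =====

-- B folds a per-tool numeric priority rank to a minimum in one pass and indexes a table, instead of A's staged any-substring scans (alternative; return value only).
-- ===== PORT A =====
def generate_follow_up_suggestions (tool_results : List (List (String × String))) (original_message : String) : List String :=
  let suggestions : List String := []
  let tool_names : List String := tool_results.map (fun result => (PySem.Dict.mk result).getD "tool_name" "")
  let suggestions :=
    if tool_names.any (fun name => PySem.Str.isIn "product_search" name) then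
      suggestions ++ [
        "Would you like to see more details about any of these products?",
        "Should I add any of these items to your cart?",
        "Would you like to see similar products?"]
    else if tool_names.any (fun name => PySem.Str.isIn "cart" name) then
      suggestions ++ [
        "Ready to checkout?",
        "Would you like to continue shopping?",
        "Need help with shipping options?"]
    else if tool_names.any (fun name => PySem.Str.isIn "order" name) then
      suggestions ++ [
        "Would you like to track another order?",
        "Need help with returns or exchanges?",
        "Have questions about your order?"]
    else
      suggestions ++ [
        "What else can I help you with?",
        "Would you like to browse our products?",
        "Need help with your account?"]
  PySem.List.slice suggestions none (some 3)   -- suggestions[:3]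

-- ===== PORT B =====
def pvSuggestionSets : List (List String) := [
  [ "Would you like to see more details about any of these products?",
    "Should I add any of these items to your cart?",
    "Would you like to see similar products?"],
  [ "Ready to checkout?",
    "Would you like to continue shopping?",
    "Need help with shipping options?"],
  [ "Would you like to track another order?",
    "Need help with returns or exchanges?",
    "Have questions about your order?"],
  [ "What else can I help you with?",
    "Would you like to browse our products?",
    "Need help with your account?"]]

-- _rank: priority rank of a single tool name (0 = highest priority)
def pvRank (name : String) : Nat :=
  if PySem.Str.isIn "product_search" name then 0
  else if PySem.Str.isIn "cart" name then 1
  else if PySem.Str.isIn "order" name then 2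
  else 3

def generate_follow_up_suggestions_alt (tool_results : List (List (String × String))) (original_message : String) : List String :=
  let best : Nat := tool_results.foldl
    (fun best result => min best (pvRank ((PySem.Dict.mk result).getD "tool_name" ""))) 3
  pvSuggestionSets.getD best []

-- ===== PRECONDITION & SPEC =====
def Spec_generate_follow_up_suggestions (tool_results : List (List (String × String))) (original_message : String) (out : List String) : Prop := out = generate_follow_up_suggestions_alt tool_results original_message
instance (tool_results : List (List (String × String))) (original_message : String) (out : List String) : Decidable (Spec_generate_follow_up_suggestions tool_results original_message out) := by unfold Spec_generate_follow_up_suggestions; infer_instance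

-- ===== CLAIM (what is proved, stated in full; the proofs are below) =====
def Claim_equal_generate_follow_up_suggestions : Prop := ∀ (tool_results : List (List (String × String))) (original_message : String), Dom_generate_follow_up_suggestions tool_results original_message → Spec_generate_follow_up_suggestions tool_results original_message (generate_follow_up_suggestions tool_results original_message)

-- ===== LEMMAS AND PROOFS =====

theorem pvRank_le (n : String) : pvRank n ≤ 3 := by
  unfold pvRank; split_ifs <;> omega

-- the fold of min over ranks, with any start a ≤ 3, equals min a (fold from 3)
theorem pvFold_min (l : List String) : ∀ a : Nat, a ≤ 3 →
    l.foldl (fun b n => min b (pvRank n)) a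
      = min a (l.foldl (fun b n => min b (pvRank n)) 3) := by
  induction l with
  | nil => intro a ha; simp; omega
  | cons n l ih =>
    intro a ha
    simp only [List.foldl_cons]
    rw [ih (min a (pvRank n)) (by omega),
        ih (min 3 (pvRank n)) (by omega)]
    have := pvRank_le n
    omega

-- characterisation of the minimum rank by the three staged scans
theorem pvBest_spec (l : List String) :
    l.foldl (fun b n => min b (pvRank n)) 3
      = (if l.any (fun name => PySem.Str.isIn "product_search" name) then 0
         else if l.any (fun name => PySem.Str.isIn "cart" name) then 1
         else if l.any (fun name => PySem.Str.isIn "order" name) then 2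
         else 3) := by
  induction l with
  | nil => rfl
  | cons n l ih =>
    simp only [List.foldl_cons, List.any_cons, Bool.or_eq_true]
    rw [pvFold_min l (min 3 (pvRank n)) (by omega), ih]
    unfold pvRank
    cases h1 : PySem.Str.isIn "product_search" n <;>
    cases h2 : PySem.Str.isIn "cart" n <;>
    cases h3 : PySem.Str.isIn "order" n <;>
    cases g1 : l.any (fun name => PySem.Str.isIn "product_search" name) <;>
    cases g2 : l.any (fun name => PySem.Str.isIn "cart" name) <;>
    cases g3 : l.any (fun name => PySem.Str.isIn "order" name) <;>
    simp

-- ===== VERDICT (by name: the statement is the Claim_ definition above) =====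
theorem generate_follow_up_suggestions_spec : Claim_equal_generate_follow_up_suggestions := by
  intro tool_results original_message _
  unfold Spec_generate_follow_up_suggestions generate_follow_up_suggestions generate_follow_up_suggestions_alt
  rw [show tool_results.foldl
        (fun best result => min best (pvRank ((PySem.Dict.mk result).getD "tool_name" ""))) 3
      = (tool_results.map (fun result => (PySem.Dict.mk result).getD "tool_name" "")).foldl
        (fun b n => min b (pvRank n)) 3 from
      (List.foldl_map (f := fun result => (PySem.Dict.mk result).getD "tool_name" "")
        (g := fun b n => min b (pvRank n)) (l := tool_results) (init := 3)).symm]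
  rw [pvBest_spec]
  generalize (tool_results.map (fun result => (PySem.Dict.mk result).getD "tool_name" "")) = tn
  cases h1 : tn.any (fun name => PySem.Str.isIn "product_search" name) <;>
  cases h2 : tn.any (fun name => PySem.Str.isIn "cart" name) <;>
  cases h3 : tn.any (fun name => PySem.Str.isIn "order" name) <;>
  simp only [h1, h2, h3, if_true] <;> rfl
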